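-- pv_equiv track=rewrite | github.com/partofthething/morse-code-trainer | morsecodetrainer/trainer.py | get_new_letter_dates
-- ===== SOURCE A (Python) =====
-- def get_new_letter_dates(times, chars):
--     """
--     Find dates where we added a new letter
--     """
--     transitions = []
--     max_num_chars = chars[0]
--     last_tm = times[0]
--     for tm, num_chars in zip(times, chars):
--         if num_chars > max_num_chars:
--             transitions.append(last_tm)
--             max_num_chars = num_chars
--         last_tm = tm
--     return transitions
-- ===== SOURCE B (Python) =====
-- def get_new_letter_dates(times, chars):
--     """
--     Find dates where we added a new letter
--     """
--     pairs = list(zip(times, chars))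
--     # first pass: prefix-maximum table of the char counts
--     run = []
--     m = None
--     for _, c in pairs:
--         m = c if m is None else max(m, c)
--         run.append(m)
--     ts = [t for t, _ in pairs]
--     # second pass: a letter was added where the running max strictly increases;
--     # report the time of the session just before the increase
--     return [t for t, (prev, cur) in zip(ts, zip(run, run[1:])) if cur > prev]
-- ===== Notes on version B (the rewrite author's own statement) =====
-- stated objective: alternative
-- what changed: B replaces A's single stateful loop (tracking max-so-far and last time) by two passes: it first builds a prefix-maximum table of the char counts, then zips that table against its own shift and the time list to collect the time preceding each strict increase.
import Mathlib
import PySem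

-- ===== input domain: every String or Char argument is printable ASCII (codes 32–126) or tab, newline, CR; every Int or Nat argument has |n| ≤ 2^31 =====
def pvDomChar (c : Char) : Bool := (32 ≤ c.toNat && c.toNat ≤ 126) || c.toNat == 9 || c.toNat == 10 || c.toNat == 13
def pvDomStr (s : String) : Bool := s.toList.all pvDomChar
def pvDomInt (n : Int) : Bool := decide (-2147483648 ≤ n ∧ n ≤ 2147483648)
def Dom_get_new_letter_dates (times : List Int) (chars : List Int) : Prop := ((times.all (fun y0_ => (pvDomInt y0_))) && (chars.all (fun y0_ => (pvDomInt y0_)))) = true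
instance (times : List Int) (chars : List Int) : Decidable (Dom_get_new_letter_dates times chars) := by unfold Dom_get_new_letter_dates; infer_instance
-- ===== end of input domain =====

-- B builds a prefix-maximum table in a first pass, then a second zip-scan collects the
-- time before each strict increase (alternative decomposition of A's single stateful loop;
-- return-value equivalence; A raises on empty input, B returns []).


-- ===== PORT A =====
-- loop body of A: state = (transitions, max_num_chars, last_tm), pair = (tm, num_chars)
def stepA (st : List Int × Int × Int) (p : Int × Int) : List Int × Int × Int :=
  if p.2 > st.2.1 then (st.1 ++ [st.2.2], p.2, p.1) else (st.1, st.2.1, p.1)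

def get_new_letter_dates (times : List Int) (chars : List Int) : List Int :=
  -- chars[0] / times[0]: IndexError on empty input (none case, excluded by Pre_)
  match PySem.List.pyGet? chars 0, PySem.List.pyGet? times 0 with
  | some c0, some t0 => ((times.zip chars).foldl stepA ([], c0, t0)).1
  | _, _ => []

-- ===== PORT B =====
-- loop body of B's first pass: state = (run, m), m = None before the first pair
def stepR (st : List Int × Option Int) (p : Int × Int) : List Int × Option Int :=
  match st.2 with
  | none => (st.1 ++ [p.2], some p.2)
  | some v => (st.1 ++ [max v p.2], some (max v p.2))

def get_new_letter_dates_alt (times : List Int) (chars : List Int) : List Int :=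
  let pairs := times.zip chars
  let run := (pairs.foldl stepR ([], none)).1
  let ts := pairs.map Prod.fst
  (ts.zip (run.zip (run.drop 1))).filterMap
    (fun x => if x.2.2 > x.2.1 then some x.1 else none)

-- ===== PRECONDITION & SPEC =====
-- A eagerly indexes chars[0] and times[0], so it raises IndexError when either list is empty
def Pre_get_new_letter_dates (times : List Int) (chars : List Int) : Prop :=
  times ≠ [] ∧ chars ≠ []
instance (times : List Int) (chars : List Int) : Decidable (Pre_get_new_letter_dates times chars) := by
  unfold Pre_get_new_letter_dates; infer_instance
def pvWitness_get_new_letter_dates : List Int × List Int := ([1, 2, 3, 4], [1, 1, 2, 2])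

def Spec_get_new_letter_dates (times : List Int) (chars : List Int) (out : List Int) : Prop := out = get_new_letter_dates_alt times chars
instance (times : List Int) (chars : List Int) (out : List Int) : Decidable (Spec_get_new_letter_dates times chars out) := by unfold Spec_get_new_letter_dates; infer_instance

-- ===== CLAIM (what is proved, stated in full; the proofs are below) =====
def Claim_equal_get_new_letter_dates : Prop := ∀ (times : List Int) (chars : List Int), Dom_get_new_letter_dates times chars → Pre_get_new_letter_dates times chars → Spec_get_new_letter_dates times chars (get_new_letter_dates times chars)

-- ===== LEMMAS AND PROOFS =====

-- common recursive characterisation of the transition list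
def specR (m l : Int) : List (Int × Int) → List Int
  | [] => []
  | p :: r => if p.2 > m then l :: specR p.2 p.1 r else specR m p.1 r

-- prefix maxima (seeded with m) of the second components
def go2 (m : Int) : List (Int × Int) → List Int
  | [] => []
  | p :: r => max m p.2 :: go2 (max m p.2) r

theorem foldA_spec (ps : List (Int × Int)) : ∀ (acc : List Int) (m l : Int),
    (ps.foldl stepA (acc, m, l)).1 = acc ++ specR m l ps := by
  induction ps with
  | nil => intro acc m l; simp [specR]
  | cons p r ih =>
    intro acc m l
    by_cases h : p.2 > m
    · simp [stepA, specR, h, ih]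
    · simp [stepA, specR, h, ih]

theorem foldR_spec (ps : List (Int × Int)) : ∀ (acc : List Int) (m : Int),
    (ps.foldl stepR (acc, some m)).1 = acc ++ go2 m ps := by
  induction ps with
  | nil => intro acc m; simp [go2]
  | cons p r ih => intro acc m; simp [stepR, go2, ih]

theorem main_lemma (zs : List (Int × Int)) : ∀ (m l : Int),
    (((l :: zs.map Prod.fst).zip ((m :: go2 m zs).zip ((m :: go2 m zs).drop 1))).filterMap
      (fun x => if x.2.2 > x.2.1 then some x.1 else none)) = specR m l zs := by
  induction zs with
  | nil => intro m l; simp [go2, specR]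
  | cons p r ih =>
    intro m l
    have hmax : (max m p.2 > m) ↔ (p.2 > m) := by
      constructor
      · intro h; rcases max_choice m p.2 with hc | hc <;> omega
      · intro h; omega
    by_cases h : p.2 > m
    · have hm : max m p.2 = p.2 := by omega
      simp only [go2, List.map_cons, List.drop_succ_cons, List.drop_zero, List.zip_cons_cons,
        List.filterMap_cons, specR, hm]
      rw [if_pos h, if_pos (by simpa [hm] using h)]
      have := ih p.2 p.1
      simp only [List.drop_succ_cons, List.drop_zero] at this
      simpa using this
    · have hm : max m p.2 = m := by omega
      simp only [go2, List.map_cons, List.drop_succ_cons, List.drop_zero, List.zip_cons_cons,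
        List.filterMap_cons, specR, hm]
      rw [if_neg h, if_neg (by simpa [hm] using h)]
      have := ih m p.1
      simp only [List.drop_succ_cons, List.drop_zero] at this
      simpa using this

-- ===== VERDICT (by name: the statement is the Claim_ definition above) =====
theorem get_new_letter_dates_spec : Claim_equal_get_new_letter_dates := by
  intro times chars _ hpre
  obtain ⟨ht, hc⟩ := hpre
  obtain ⟨t0, ts', rfl⟩ : ∃ a l, times = a :: l := by
    cases times with | nil => exact absurd rfl ht | cons a l => exact ⟨a, l, rfl⟩
  obtain ⟨c0, cs', rfl⟩ : ∃ a l, chars = a :: l := by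
    cases chars with | nil => exact absurd rfl hc | cons a l => exact ⟨a, l, rfl⟩
  unfold Spec_get_new_letter_dates get_new_letter_dates get_new_letter_dates_alt
  simp only [PySem.List.pyGet?, PySem.List.pyIdx?, List.length_cons]
  norm_num
  have hs : stepA ([], c0, t0) (t0, c0) = ([], c0, t0) := by simp [stepA]
  have hr : stepR ([], none) (t0, c0) = ([c0], some c0) := by simp [stepR]
  rw [hs, hr, foldA_spec, foldR_spec]
  simpa using (main_lemma (ts'.zip cs') c0 t0).symm
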